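-- pv_equiv track=rewrite | github.com/softmoca/Python_Algorithm_CodingTest | 입문자를 위힌 코딩테스트 핵심2/6회 그리디(Greedy Algorithm)/기본 코드/4. 카드 점수[O(n)].py | solution
-- ===== SOURCE A (Python) =====
-- def solution(nums, k):
--     answer = 0
--     N=len(nums)
--     S=sum(nums)
--     block_size=N-k
--
--     Minn=100
--     for i in range(N-block_size+1):
--         if Minn>sum(nums[i:i+block_size]):
--             Minn=sum(nums[i:i+block_size])
--     answer=S-Minn
--
--
--
--
--     return answer
-- ===== SOURCE B (Python) =====
-- def solution(nums, k):
--     prefix = [0]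
--     for x in nums:
--         prefix.append(prefix[-1] + x)
--     bs = len(nums) - k
--     best = 100
--     for lo, hi in zip(prefix, prefix[bs:]):
--         best = min(best, hi - lo)
--     return prefix[-1] - best
-- ===== Notes on version B (the rewrite author's own statement) =====
-- stated objective: faster
-- what changed: Replaces A's per-start re-summation of each length-(n-k) slice with a prefix-sum table built once, each window sum becoming one O(1) difference of two prefix sums paired by zip; Pre_ excludes only the band len(nums) < k <= 2*len(nums), where A's value comes from accidentally clamped negative-length slices and B's value differs.
-- outside the precondition, e.g. on solution([1, 2], 3): A returns 3, B returns 0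
import Mathlib
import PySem

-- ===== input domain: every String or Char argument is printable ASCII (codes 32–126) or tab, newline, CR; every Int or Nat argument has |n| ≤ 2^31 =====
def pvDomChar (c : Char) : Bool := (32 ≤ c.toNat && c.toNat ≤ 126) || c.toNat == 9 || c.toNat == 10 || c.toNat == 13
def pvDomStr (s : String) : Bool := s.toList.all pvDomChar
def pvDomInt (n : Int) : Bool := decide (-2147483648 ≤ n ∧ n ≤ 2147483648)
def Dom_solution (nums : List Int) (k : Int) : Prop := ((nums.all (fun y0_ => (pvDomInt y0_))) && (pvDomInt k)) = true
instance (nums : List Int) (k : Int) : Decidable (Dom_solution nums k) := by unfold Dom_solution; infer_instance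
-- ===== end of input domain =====

-- B replaces A's per-start re-summation of every window with a prefix-sum table built
-- once, each window sum becoming one difference of two prefix sums (objective: faster).

-- ===== PORT A =====
def solution (nums : List Int) (k : Int) : Int :=
  let N : Int := nums.length
  let S : Int := nums.sum
  let blockSize : Int := N - k
  let minn : Int :=
    (PySem.List.pyRange 0 (N - blockSize + 1) 1).foldl
      (fun minn i =>
        if minn > (PySem.List.slice nums (some i) (some (i + blockSize))).sum then
          (PySem.List.slice nums (some i) (some (i + blockSize))).sum
        else minn) 100
  S - minn

-- ===== PORT B =====
def solution_alt (nums : List Int) (k : Int) : Int :=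
  let pre : List Int := nums.foldl (fun p x => p ++ [PySem.List.pyGetD p (-1) 0 + x]) [0]
  let bs : Int := (nums.length : Int) - k
  let best : Int :=
    (pre.zip (PySem.List.slice pre (some bs) none)).foldl
      (fun best p => min best (p.2 - p.1)) 100
  PySem.List.pyGetD pre (-1) 0 - best

-- ===== PRECONDITION & SPEC =====
-- Pre_ excludes only the band len(nums) < k ≤ 2*len(nums): there A's negative-length
-- windows are accidentally clamped slices of Python's slice semantics and B's value
-- differs; everywhere else (k ≤ len(nums) and k > 2*len(nums)) A = B.
def Pre_solution (nums : List Int) (k : Int) : Prop :=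
  k ≤ (nums.length : Int) ∨ 2 * (nums.length : Int) + 1 ≤ k
instance (nums : List Int) (k : Int) : Decidable (Pre_solution nums k) := by unfold Pre_solution; infer_instance
def pvWitness_solution : List Int × Int := ([3, 1, 4, 1, 5], 2)

def Spec_solution (nums : List Int) (k : Int) (out : Int) : Prop := out = solution_alt nums k
instance (nums : List Int) (k : Int) (out : Int) : Decidable (Spec_solution nums k out) := by unfold Spec_solution; infer_instance

-- ===== CLAIM (what is proved, stated in full; the proofs are below) =====
def Claim_equal_solution : Prop := ∀ (nums : List Int) (k : Int), Dom_solution nums k → Pre_solution nums k → Spec_solution nums k (solution nums k)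

-- ===== LEMMAS AND PROOFS =====

-- window sum: the sum of the length-b window of nums starting at j
def Wnd (nums : List Int) (b j : Nat) : Int := ((nums.drop j).take b).sum

-- the running minimum A maintains, as a fold of min over window starts
def Amin (nums : List Int) (b t : Nat) : Int :=
  (List.range t).foldl (fun m j => min m (Wnd nums b j)) 100

-- the prefix table B builds is the table of prefix sums
lemma prefix_build (nums : List Int) :
    nums.foldl (fun p x => p ++ [PySem.List.pyGetD p (-1) 0 + x]) [0]
      = (List.range (nums.length + 1)).map (fun j => (nums.take j).sum) := by
  induction nums using List.reverseRecOn with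
  | nil => rfl
  | append_singleton l x ih =>
    rw [List.foldl_append, ih]
    simp only [List.foldl_cons, List.foldl_nil]
    have hlast : PySem.List.pyGetD
        ((List.range (l.length + 1)).map (fun j => (l.take j).sum)) (-1) 0 = l.sum := by
      simp [PySem.List.pyGetD, PySem.List.pyGet?, PySem.List.pyIdx?, List.getElem?_map]
    rw [hlast]
    simp only [List.length_append, List.length_cons, List.length_nil]
    have hr : List.range (l.length + (0 + 1) + 1) = List.range (l.length + 1) ++ [l.length + 1] := by
      norm_num [List.range_succ]
    rw [hr, List.map_append]
    congr 1
    · apply List.map_congr_left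
      intro j hj
      rw [List.mem_range] at hj
      rw [List.take_append_of_le_length (by omega)]
    · simp

-- reading the last entry of the prefix table gives the total sum
lemma prefix_last (nums : List Int) :
    PySem.List.pyGetD
      ((List.range (nums.length + 1)).map (fun j => (nums.take j).sum)) (-1) 0 = nums.sum := by
  simp [PySem.List.pyGetD, PySem.List.pyGet?, PySem.List.pyIdx?, List.getElem?_map]

-- a sum over a middle segment is a difference of two prefix sums
lemma sum_take_drop (l : List Int) (a b : Nat) (h : a ≤ b) :
    ((l.drop a).take (b - a)).sum = (l.take b).sum - (l.take a).sum := by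
  have hb : b = a + (b - a) := by omega
  rw [hb, List.take_add]
  simp

lemma Wnd_eq_prefix (nums : List Int) (b j : Nat) (h : j + b ≤ nums.length) :
    Wnd nums b j = (nums.take (j + b)).sum - (nums.take j).sum := by
  unfold Wnd
  have := sum_take_drop nums j (j + b) (by omega)
  simpa [Nat.add_sub_cancel_left] using this

-- zipping a range-indexed table with its own drop pairs each entry with the one b later
lemma zip_table_drop {α : Type} (f : Nat → α) (m b : Nat) (hb : b ≤ m) :
    ((List.range m).map f).zip (((List.range m).map f).drop b)
      = (List.range (m - b)).map (fun i => (f i, f (i + b))) := by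
  apply List.ext_getElem
  · simp
  · intro i h1 h2
    have hi : i < m - b := by simpa using h2
    rw [List.getElem_zip]
    simp [hi, Nat.add_comm b i, show b + i < m by omega, show i < m by omega]

-- zipping a list with itself pairs each entry with itself
lemma zip_self {α : Type} (l : List α) : l.zip l = l.map (fun x => (x, x)) := by
  induction l with
  | nil => rfl
  | cons x t ih => simp [List.zip_cons_cons, ih]

-- a min-with-0 fold over a nonempty list is min acc 0
lemma foldl_min_zero {α : Type} (l : List α) (acc : Int) (h : l ≠ []) :
    l.foldl (fun b (_ : α) => min b 0) acc = min acc 0 := by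
  induction l generalizing acc with
  | nil => exact absurd rfl h
  | cons x t ih =>
    cases t with
    | nil => rfl
    | cons y t' =>
      rw [List.foldl_cons, ih (min acc 0) (by simp), min_assoc, min_self]

-- a zero-clamping fold from accumulator 0 stays 0
lemma foldl_zero_clamp (l : List Int) :
    l.foldl (fun m (_ : Int) => if m > (0 : Int) then 0 else m) 0 = 0 := by
  induction l with
  | nil => rfl
  | cons x t ih => simpa using ih

-- ===== VERDICT (by name: the statement is the Claim_ definition above) =====
theorem solution_spec : Claim_equal_solution := by
  intro nums k _ hpre
  unfold Spec_solution solution solution_alt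
  simp only []
  rw [prefix_build nums, prefix_last nums]
  set n : Nat := nums.length with hn
  have hlenP : ((List.range (n + 1)).map (fun j => ((nums.take j).sum : Int))).length = n + 1 := by
    simp
  by_cases hk0 : 0 ≤ k
  case neg =>
    -- k < 0: A runs zero windows; B's zip is empty since prefix[bs:] is empty
    have h1 : PySem.List.pyRange 0 ((n : Int) - ((n : Int) - k) + 1) 1 = [] :=
      PySem.List.pyRange_one_eq_nil (by omega)
    have h2 : PySem.List.slice ((List.range (n + 1)).map (fun j => ((nums.take j).sum : Int)))
        (some ((n : Int) - k)) none = [] := by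
      rw [PySem.List.slice_some_none, hlenP]
      have : PySem.List.clampIdx (n + 1) ((n : Int) - k) = n + 1 := by
        unfold PySem.List.clampIdx; split_ifs <;> omega
      rw [this]
      exact List.drop_of_length_le (by simp)
    rw [h1, h2]
    simp
  case pos =>
  rcases hpre with hkn | hbig
  · -- 0 ≤ k ≤ n: both sides compute min(100, min of the k+1 window sums)
    set K : Nat := k.toNat with hK
    have hKn : K ≤ n := by omega
    set b : Nat := n - K with hb
    have hbs : (n : Int) - k = (b : Int) := by omega
    have hrange : (n : Int) - ((n : Int) - k) + 1 = ((K + 1 : Nat) : Int) := by push_cast; omega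
    have hA :
        (PySem.List.pyRange 0 ((n : Int) - ((n : Int) - k) + 1) 1).foldl
          (fun minn i =>
            if minn > (PySem.List.slice nums (some i) (some (i + ((n : Int) - k)))).sum then
              (PySem.List.slice nums (some i) (some (i + ((n : Int) - k)))).sum
            else minn) 100 = Amin nums b (K + 1) := by
      rw [hrange, PySem.List.pyRange_zero_natCast, List.foldl_map]
      unfold Amin
      apply PySem.List.foldl_congr_mem
      intro m j hj
      rw [List.mem_range] at hj
      have hslice : PySem.List.slice nums (some (j : Int)) (some ((j : Int) + ((n : Int) - k)))
          = (nums.drop j).take b := by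
        rw [hbs, PySem.List.slice_natCast_add]
      rw [hslice]
      show (if m > Wnd nums b j then Wnd nums b j else m) = min m (Wnd nums b j)
      rw [min_def]; split_ifs <;> omega
    rw [hA]
    -- B's side
    have hdrop : PySem.List.slice ((List.range (n + 1)).map (fun j => ((nums.take j).sum : Int)))
        (some ((n : Int) - k)) none
        = ((List.range (n + 1)).map (fun j => ((nums.take j).sum : Int))).drop b := by
      rw [hbs, PySem.List.slice_from_natCast]
    rw [hdrop, zip_table_drop (fun j => ((nums.take j).sum : Int)) (n + 1) b (by omega)]
    have hnb : n + 1 - b = K + 1 := by omega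
    rw [hnb, List.foldl_map]
    have hB : (List.range (K + 1)).foldl
        (fun (best : Int) (i : Nat) =>
          min best ((nums.take (i + b)).sum - (nums.take i).sum)) 100
        = Amin nums b (K + 1) := by
      unfold Amin
      apply PySem.List.foldl_congr_mem
      intro m j hj
      rw [List.mem_range] at hj
      rw [Wnd_eq_prefix nums b j (by omega)]
    rw [hB]
  · -- 2n+1 ≤ k: every window of A is an empty slice, and B's zip pairs prefix with itself
    have hA :
        (PySem.List.pyRange 0 ((n : Int) - ((n : Int) - k) + 1) 1).foldl
          (fun minn i =>
            if minn > (PySem.List.slice nums (some i) (some (i + ((n : Int) - k)))).sum then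
              (PySem.List.slice nums (some i) (some (i + ((n : Int) - k)))).sum
            else minn) 100 = 0 := by
      have hstep : (PySem.List.pyRange 0 ((n : Int) - ((n : Int) - k) + 1) 1).foldl
          (fun minn i =>
            if minn > (PySem.List.slice nums (some i) (some (i + ((n : Int) - k)))).sum then
              (PySem.List.slice nums (some i) (some (i + ((n : Int) - k)))).sum
            else minn) 100
          = (PySem.List.pyRange 0 ((n : Int) - ((n : Int) - k) + 1) 1).foldl
          (fun minn (_ : Int) => if minn > (0 : Int) then 0 else minn) 100 := by
        apply PySem.List.foldl_congr_mem
        intro m i hi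
        rw [PySem.List.mem_pyRange_one] at hi
        have hempty : PySem.List.slice nums (some i) (some (i + ((n : Int) - k))) = [] := by
          have hle : PySem.List.clampIdx nums.length (i + ((n : Int) - k))
              ≤ PySem.List.clampIdx nums.length i := by
            unfold PySem.List.clampIdx; split_ifs <;> omega
          have hl : (PySem.List.slice nums (some i) (some (i + ((n : Int) - k)))).length = 0 := by
            rw [PySem.List.length_slice]; omega
          exact List.length_eq_zero_iff.mp hl
        rw [hempty]
        rfl
      rw [hstep]
      have hcons : PySem.List.pyRange 0 ((n : Int) - ((n : Int) - k) + 1) 1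
          = 0 :: PySem.List.pyRange 1 ((n : Int) - ((n : Int) - k) + 1) 1 :=
        PySem.List.pyRange_one_cons (by omega)
      rw [hcons, List.foldl_cons]
      simpa using foldl_zero_clamp (PySem.List.pyRange 1 ((n : Int) - ((n : Int) - k) + 1) 1)
    rw [hA]
    -- B's side: prefix[bs:] is the whole prefix table
    have hall : PySem.List.slice ((List.range (n + 1)).map (fun j => ((nums.take j).sum : Int)))
        (some ((n : Int) - k)) none
        = (List.range (n + 1)).map (fun j => ((nums.take j).sum : Int)) := by
      rw [PySem.List.slice_some_none, hlenP]
      have : PySem.List.clampIdx (n + 1) ((n : Int) - k) = 0 := by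
        unfold PySem.List.clampIdx; split_ifs <;> omega
      rw [this, List.drop_zero]
    rw [hall, zip_self, List.foldl_map]
    have hBfold : ((List.range (n + 1)).map (fun j => ((nums.take j).sum : Int))).foldl
        (fun (best x : Int) => min best (x - x)) 100 = 0 := by
      have hc : ((List.range (n + 1)).map (fun j => ((nums.take j).sum : Int))).foldl
          (fun (best x : Int) => min best (x - x)) 100
          = ((List.range (n + 1)).map (fun j => ((nums.take j).sum : Int))).foldl
          (fun (best : Int) (_ : Int) => min best 0) 100 := by
        apply PySem.List.foldl_congr_mem
        intro m x _
        rw [sub_self]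
      rw [hc, foldl_min_zero _ 100 (by simp)]
      rfl
    rw [hBfold]
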